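-- pv_equiv track=rewrite | github.com/EggheadJohnson/AdventOfCode2020 | 14/b.py | enumerateOptions
-- ===== SOURCE A (Python) =====
-- def toStringBaseTwo(n, left_pad = 36):
--     output = ''
--     while n > 0:
--         output = str(n%2) + output
--         n //= 2
--     while len(output) < left_pad:
--         output = '0' + output
--     return output
--
-- def enumerateOptions(bin_val):
--     options = []
--     ct = bin_val.count('X')
--     swappable = ''
--     for c in bin_val:
--         if c == 'X':
--             swappable += '{}'
--         else:
--             swappable += c
--     for i in range(2**ct):
--         bin_str = toStringBaseTwo(i, ct)
--         options.append(swappable.format(*bin_str))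
--     return options
-- ===== SOURCE B (Python) =====
-- def enumerateOptions(bin_val):
--     options = ['']
--     for c in reversed(bin_val):
--         if c == 'X':
--             options = ['0' + t for t in options] + ['1' + t for t in options]
--         else:
--             options = [c + t for t in options]
--     return options
-- ===== Notes on version B (the rewrite author's own statement) =====
-- stated objective: simpler
-- what changed: Replaces the count-X + integer-counter + base-two-conversion + str.format pipeline by a single back-to-front pass over the string that extends the option list at each character, doubling it ('0' branch before '1') at each X.
-- outside the precondition, e.g. on enumerateOptions('{'): A raises ValueError, B returns ['{']; on enumerateOptions('}'): A raises ValueError, B returns ['}']; on enumerateOptions('{{'): A returns ['{'], B returns ['{{']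
import Mathlib
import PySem

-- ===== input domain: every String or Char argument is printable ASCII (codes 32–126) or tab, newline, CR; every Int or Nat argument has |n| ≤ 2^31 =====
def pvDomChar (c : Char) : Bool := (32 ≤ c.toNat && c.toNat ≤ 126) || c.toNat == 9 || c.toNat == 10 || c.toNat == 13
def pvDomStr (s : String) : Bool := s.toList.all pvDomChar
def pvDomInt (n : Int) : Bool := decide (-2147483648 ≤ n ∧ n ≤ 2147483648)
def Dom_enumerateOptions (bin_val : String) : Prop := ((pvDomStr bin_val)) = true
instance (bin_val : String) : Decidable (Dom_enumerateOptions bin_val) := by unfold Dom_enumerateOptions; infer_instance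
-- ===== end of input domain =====

-- B replaces A's count-X / integer-counter / base-two-conversion / str.format pipeline by a direct
-- structural recursion on the string (objective: simpler).

-- ===== PORT A =====
-- 'while n > 0: output = str(n%2) + output; n //= 2'
def tsbLoop (n : Int) (output : List Char) : List Char :=
  if 0 < n then
    tsbLoop (PySem.Int.floordiv n 2) ((PySem.Int.toStr (PySem.Int.mod n 2)).toList ++ output)
  else output
termination_by n.toNat
decreasing_by
  rename_i h
  have h2 : PySem.Int.floordiv n 2 = n / 2 := PySem.Int.floordiv_eq_ediv_of_pos (by omega)
  rw [h2]; omega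

-- 'while len(output) < left_pad: output = "0" + output'
def tsbPad (output : List Char) (left_pad : Int) : List Char :=
  if (output.length : Int) < left_pad then tsbPad ('0' :: output) left_pad else output
termination_by (left_pad - output.length).toNat
decreasing_by
  rename_i h
  simp only [List.length_cons]
  omega

def toStringBaseTwo (n : Int) (left_pad : Int) : String :=
  String.ofList (tsbPad (tsbLoop n []) left_pad)

-- the body of A's 'for c in bin_val' loop: '{}' for an 'X', the character itself otherwise
def pat (c : Char) : List Char := if c = 'X' then ['{', '}'] else [c]

-- swappable.format(*bin_str): substitute the k-th argument for the k-th '{}' placeholder.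
-- Exact when every brace of the template belongs to an inserted '{}' placeholder pair and the
-- arguments suffice — guaranteed here because Pre_ forbids braces in bin_val, so the braces of
-- 'swappable' are exactly the '{}' inserted per 'X', matched by the ct characters of bin_str.
def fmtFill : List Char → List Char → List Char
  | '{' :: '}' :: rest, a :: args => a :: fmtFill rest args
  | '{' :: '}' :: rest, [] => fmtFill rest []
  | c :: rest, args => c :: fmtFill rest args
  | [], _ => []

def enumerateOptions (bin_val : String) : List String :=
  let ct := PySem.Str.count bin_val "X"
  let swappable := bin_val.toList.foldl (fun acc c => acc ++ pat c) []
  (PySem.List.pyRange 0 ((2 : Int) ^ ct) 1).foldl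
    (fun options i =>
      options ++ [String.ofList (fmtFill swappable (toStringBaseTwo i (ct : Int)).toList)]) []

-- ===== PORT B =====
-- the body of Source B's 'for c in reversed(bin_val)' loop
def altStep (options : List (List Char)) (c : Char) : List (List Char) :=
  if c = 'X' then
    options.map (fun t => '0' :: t) ++ options.map (fun t => '1' :: t)
  else
    options.map (fun t => c :: t)

def enumerateOptions_alt (bin_val : String) : List String :=
  (bin_val.toList.reverse.foldl altStep [[]]).map String.ofList

-- ===== PRECONDITION & SPEC =====
-- Pre_ excludes strings containing '{' or '}': on almost all of them A raises (ValueError /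
-- IndexError inside str.format), and on the few where format's brace escaping happens to succeed
-- (e.g. '{{') A's value is an artefact of feeding the input characters through str.format.
def Pre_enumerateOptions (bin_val : String) : Prop :=
  '{' ∉ bin_val.toList ∧ '}' ∉ bin_val.toList
instance (bin_val : String) : Decidable (Pre_enumerateOptions bin_val) := by
  unfold Pre_enumerateOptions; infer_instance

def pvWitness_enumerateOptions : String := "X0X"

def Spec_enumerateOptions (bin_val : String) (out : List String) : Prop := out = enumerateOptions_alt bin_val
instance (bin_val : String) (out : List String) : Decidable (Spec_enumerateOptions bin_val out) := by unfold Spec_enumerateOptions; infer_instance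

-- ===== CLAIM (what is proved, stated in full; the proofs are below) =====
def Claim_equal_enumerateOptions : Prop := ∀ (bin_val : String), Dom_enumerateOptions bin_val → Pre_enumerateOptions bin_val → Spec_enumerateOptions bin_val (enumerateOptions bin_val)

-- ===== LEMMAS AND PROOFS =====

-- str(n%2) for n ≥ 0: the single binary digit
def bitc (r : Nat) : Char := if r = 1 then '1' else '0'

-- the digits A's first while-loop accumulates (MSB first, no leading zeros)
def rawbits : Nat → List Char
  | 0 => []
  | i + 1 => rawbits ((i + 1) / 2) ++ [bitc ((i + 1) % 2)]
decreasing_by omega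

-- i written in exactly ct binary digits (MSB first): the value of toStringBaseTwo i ct for i < 2^ct
def bits : Nat → Nat → List Char
  | 0, _ => []
  | n + 1, i => bits n (i / 2) ++ [bitc (i % 2)]

def bitLists (ct : Nat) : List (List Char) := (List.range (2 ^ ct)).map (bits ct)

lemma toStr_mod_two (m : Nat) : (PySem.Int.toStr ((m % 2 : Nat) : Int)).toList = [bitc (m % 2)] := by
  have h : m % 2 = 0 ∨ m % 2 = 1 := by omega
  rcases h with h | h <;> rw [h] <;> decide

lemma tsbLoop_eq (i : Nat) : ∀ output, tsbLoop (i : Int) output = rawbits i ++ output := by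
  induction i using Nat.strong_induction_on with
  | _ i ih =>
    intro output
    match i with
    | 0 => rw [tsbLoop]; simp [rawbits]
    | j + 1 =>
      rw [tsbLoop, if_pos (by positivity)]
      have hd : PySem.Int.floordiv ((j + 1 : Nat) : Int) 2 = (((j + 1) / 2 : Nat) : Int) := by
        exact_mod_cast PySem.Int.floordiv_natCast (j + 1) 2
      have hm : PySem.Int.mod ((j + 1 : Nat) : Int) 2 = (((j + 1) % 2 : Nat) : Int) := by
        exact_mod_cast PySem.Int.mod_natCast (j + 1) 2
      rw [hd, hm, toStr_mod_two, ih ((j + 1) / 2) (by omega)]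
      rw [rawbits]
      simp

lemma tsbPad_eq (out : List Char) (k : Nat) :
    tsbPad out (k : Int) = List.replicate (k - out.length) '0' ++ out := by
  by_cases h : out.length < k
  · rw [tsbPad, if_pos (by exact_mod_cast h)]
    rw [tsbPad_eq ('0' :: out) k]
    rw [show k - out.length = (k - ('0' :: out).length) + 1 from by simp; omega, List.replicate_succ']
    simp
  · rw [tsbPad, if_neg (by exact_mod_cast h)]
    rw [show k - out.length = 0 from by omega]
    rfl
termination_by (k - out.length)
decreasing_by simp; omega

lemma bits_zero (ct : Nat) : bits ct 0 = List.replicate ct '0' := by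
  induction ct with
  | zero => rfl
  | succ n ih => rw [bits]; simp [ih, bitc, List.replicate_succ']

lemma bits_eq_pad_raw (ct : Nat) : ∀ i : Nat, i < 2 ^ ct →
    bits ct i = List.replicate (ct - (rawbits i).length) '0' ++ rawbits i := by
  induction ct with
  | zero =>
    intro i hi
    interval_cases i
    simp [bits, rawbits]
  | succ n ih =>
    intro i hi
    match i with
    | 0 => rw [rawbits]; simp [bits_zero]
    | j + 1 =>
      rw [bits, rawbits, ih ((j + 1) / 2) (by
        have h2 : j + 1 < 2 ^ n * 2 := by rw [← pow_succ]; exact hi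
        omega)]
      rw [List.append_assoc, List.length_append, List.length_singleton]
      congr 2
      omega

lemma tsb_eq (ct i : Nat) (hi : i < 2 ^ ct) :
    (toStringBaseTwo (i : Int) (ct : Int)).toList = bits ct i := by
  rw [toStringBaseTwo, String.toList_ofList, tsbLoop_eq, List.append_nil, tsbPad_eq,
    bits_eq_pad_raw ct i hi]

lemma bits_head (n : Nat) : ∀ i : Nat, i < 2 ^ (n + 1) →
    bits (n + 1) i = bitc (i / 2 ^ n) :: bits n (i % 2 ^ n) := by
  induction n with
  | zero =>
    intro i hi
    interval_cases i <;> rfl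
  | succ n ih =>
    intro i hi
    have hi2 : i / 2 < 2 ^ (n + 1) := by
      have h2 : i < 2 ^ (n + 1) * 2 := by rw [← pow_succ]; exact hi
      omega
    rw [show bits (n + 2) i = bits (n + 1) (i / 2) ++ [bitc (i % 2)] from rfl]
    rw [ih (i / 2) hi2]
    have e1 : i / 2 / 2 ^ n = i / 2 ^ (n + 1) := by
      rw [Nat.div_div_eq_div_mul, ← pow_succ']
    have e2 : (i % 2 ^ (n + 1)) / 2 = (i / 2) % 2 ^ n := by
      rw [show (2 : Nat) ^ (n + 1) = 2 * 2 ^ n from by rw [pow_succ']]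
      exact Nat.mod_mul_right_div_self i 2 (2 ^ n)
    have e3 : (i % 2 ^ (n + 1)) % 2 = i % 2 := Nat.mod_mod_of_dvd i (dvd_pow_self 2 (by omega))
    rw [show bits (n + 1) (i % 2 ^ (n + 1))
        = bits n ((i % 2 ^ (n + 1)) / 2) ++ [bitc ((i % 2 ^ (n + 1)) % 2)] from rfl]
    rw [e1, e2, e3]
    simp

lemma bitLists_succ (n : Nat) :
    bitLists (n + 1) = (bitLists n).map (fun t => '0' :: t) ++ (bitLists n).map (fun t => '1' :: t) := by
  unfold bitLists
  rw [show (2 : Nat) ^ (n + 1) = 2 ^ n + 2 ^ n from by rw [pow_succ]; omega]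
  rw [List.range_add, List.map_append, List.map_map, List.map_map, List.map_map]
  congr 1
  · apply List.map_congr_left
    intro k hk
    rw [List.mem_range] at hk
    simp only [Function.comp]
    rw [bits_head n k (by calc k < 2 ^ n := hk
        _ ≤ 2 ^ (n + 1) := Nat.pow_le_pow_right (by omega) (by omega))]
    rw [Nat.div_eq_of_lt hk, Nat.mod_eq_of_lt hk]
    rfl
  · apply List.map_congr_left
    intro k hk
    rw [List.mem_range] at hk
    simp only [Function.comp]
    rw [bits_head n (2 ^ n + k) (by rw [pow_succ]; omega)]
    rw [Nat.add_comm, Nat.add_div_right _ (by positivity), Nat.add_mod_right]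
    rw [Nat.div_eq_of_lt hk, Nat.mod_eq_of_lt hk]
    rfl

lemma count_go_single (c : Char) (l : List Char) : ∀ (fuel acc : Nat), l.length ≤ fuel →
    PySem.Chars.count.go [c] fuel l acc = acc + l.count c := by
  induction l with
  | nil => intro fuel acc _; cases fuel <;> simp [PySem.Chars.count.go]
  | cons h t ih =>
    intro fuel acc hf
    match fuel with
    | fuel + 1 =>
      rw [PySem.Chars.count.go]
      have hf' : t.length ≤ fuel := by simpa using hf
      by_cases hc : h = c
      · subst hc
        simp only [List.isPrefixOf, BEq.rfl, Bool.true_and, if_pos]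
        simp only [List.length_singleton, List.drop_one, List.tail_cons]
        rw [ih fuel (acc + 1) hf', List.count_cons_self]
        omega
      · rw [if_neg (by simp [List.isPrefixOf]; exact fun h' => hc h'.symm)]
        rw [ih fuel acc hf']
        simp [hc]

lemma str_count_X (s : String) : PySem.Str.count s "X" = s.toList.count 'X' := by
  rw [PySem.Str.count_eq]
  rw [show ("X" : String).toList = ['X'] from rfl]
  rw [PySem.Chars.count]
  simpa using count_go_single 'X' s.toList s.toList.length 0 (le_refl _)

lemma fmtFill_placeholder (rest : List Char) (a : Char) (args : List Char) :
    fmtFill ('{' :: '}' :: rest) (a :: args) = a :: fmtFill rest args := rfl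

lemma fmtFill_lit (c : Char) (hc : c ≠ '{') (rest args : List Char) :
    fmtFill (c :: rest) args = c :: fmtFill rest args := by
  rw [fmtFill.eq_def]
  split <;> simp_all

lemma main_fill (l : List Char) (h1 : '{' ∉ l) (h2 : '}' ∉ l) :
    (bitLists (l.count 'X')).map (fmtFill (l.flatMap pat))
      = l.foldr (fun c options => altStep options c) [[]] := by
  induction l with
  | nil => rfl
  | cons c r ih =>
    have h1r : '{' ∉ r := fun h => h1 (List.mem_cons_of_mem _ h)
    have h2r : '}' ∉ r := fun h => h2 (List.mem_cons_of_mem _ h)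
    have hc1 : c ≠ '{' := fun h => h1 (h ▸ List.mem_cons_self ..)
    by_cases hx : c = 'X'
    · subst hx
      rw [List.count_cons_self, bitLists_succ]
      rw [show List.flatMap pat ('X' :: r) = '{' :: '}' :: r.flatMap pat from by simp [pat]]
      rw [List.map_append, List.map_map, List.map_map]
      have e0 : (fmtFill ('{' :: '}' :: r.flatMap pat)) ∘ (fun t => '0' :: t)
          = (fun t => '0' :: t) ∘ fmtFill (r.flatMap pat) := by
        funext t; simp [Function.comp, fmtFill_placeholder]
      have e1 : (fmtFill ('{' :: '}' :: r.flatMap pat)) ∘ (fun t => '1' :: t)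
          = (fun t => '1' :: t) ∘ fmtFill (r.flatMap pat) := by
        funext t; simp [Function.comp, fmtFill_placeholder]
      rw [e0, e1, ← List.map_map, ← List.map_map, ih h1r h2r]
      simp [altStep]
    · rw [show List.count 'X' (c :: r) = List.count 'X' r from by simp [hx]]
      rw [show List.flatMap pat (c :: r) = c :: r.flatMap pat from by simp [pat, hx]]
      have e : (fmtFill (c :: r.flatMap pat)) = (fun t => c :: t) ∘ fmtFill (r.flatMap pat) := by
        funext t; simp [Function.comp, fmtFill_lit c hc1]
      rw [e, ← List.map_map, ih h1r h2r]
      simp [altStep, hx]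

-- ===== VERDICT (by name: the statement is the Claim_ definition above) =====
theorem enumerateOptions_spec : Claim_equal_enumerateOptions := by
  intro bin_val _ hpre
  obtain ⟨h1, h2⟩ := hpre
  show enumerateOptions bin_val = enumerateOptions_alt bin_val
  unfold enumerateOptions enumerateOptions_alt
  rw [List.foldl_reverse]
  rw [PySem.List.foldl_append_singleton_eq_map, List.nil_append]
  rw [PySem.List.foldl_append_eq_flatMap, List.nil_append]
  rw [str_count_X, PySem.List.pyRange_one]
  rw [show ((2 : Int) ^ (bin_val.toList.count 'X') - 0).toNat = 2 ^ (bin_val.toList.count 'X')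
      from by exact Int.toNat_natCast _]
  rw [List.map_map]
  rw [← main_fill bin_val.toList h1 h2, bitLists, List.map_map, List.map_map]
  apply List.map_congr_left
  intro k hk
  rw [List.mem_range] at hk
  simp only [Function.comp]
  rw [show (0 : Int) + (k : Int) = (k : Int) from by omega]
  rw [tsb_eq (bin_val.toList.count 'X') k hk]
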